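-- pv_equiv track=rewrite | github.com/zc-public/breakme-resources | cards/ulc/analyses/grouper.py | find_default_ranges
-- ===== SOURCE A (Python) =====
-- def find_default_ranges(all_values, non_default_ranges, max_value=0xFF):
--     """Find the ranges where the default response applies."""
--     # Create a set of all positions from 0 to max_value
--     all_positions = set(range(max_value + 1))
--
--     # Remove positions with non-default responses
--     for ranges in non_default_ranges.values():
--         for start_hex, end_hex in ranges:
--             start = int(start_hex, 16)
--             end = int(end_hex, 16)
--             all_positions -= set(range(start, end + 1))
--
--     # Create continuous ranges from the remaining positions
--     default_ranges = []
--     if not all_positions: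
--         return default_ranges
--
--     positions = sorted(all_positions)
--     range_start = positions[0]
--     prev = positions[0]
--
--     for pos in positions[1:]:
--         if pos > prev + 1:
--             # End of continuous range
--             default_ranges.append((format(range_start, '02X'), format(prev, '02X')))
--             range_start = pos
--         prev = pos
--
--     # Add the last range
--     default_ranges.append((format(range_start, '02X'), format(prev, '02X')))
--
--     return default_ranges
-- ===== SOURCE B (Python) =====
-- def find_default_ranges(all_values, non_default_ranges, max_value=0xFF):
--     """Find the ranges where the default response applies."""
--     covered = set()
--     for ranges in non_default_ranges.values():
--         for start_hex, end_hex in ranges: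
--             covered.update(range(int(start_hex, 16), int(end_hex, 16) + 1))
--
--     gaps = []
--     start = None
--     for p in range(max_value + 1):
--         if p in covered:
--             if start is not None:
--                 gaps.append((format(start, '02X'), format(p - 1, '02X')))
--                 start = None
--         elif start is None:
--             start = p
--     if start is not None:
--         gaps.append((format(start, '02X'), format(max_value, '02X')))
--     return gaps
-- ===== Notes on version B (the rewrite author's own statement) =====
-- stated objective: alternative
-- what changed: B builds the covered set once and emits gaps with a single run-length state machine over 0..max_value, instead of A's complement construction (set(range), repeated set differences), sorting the survivors and a separate grouping pass; the sort disappears.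
import Mathlib
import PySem

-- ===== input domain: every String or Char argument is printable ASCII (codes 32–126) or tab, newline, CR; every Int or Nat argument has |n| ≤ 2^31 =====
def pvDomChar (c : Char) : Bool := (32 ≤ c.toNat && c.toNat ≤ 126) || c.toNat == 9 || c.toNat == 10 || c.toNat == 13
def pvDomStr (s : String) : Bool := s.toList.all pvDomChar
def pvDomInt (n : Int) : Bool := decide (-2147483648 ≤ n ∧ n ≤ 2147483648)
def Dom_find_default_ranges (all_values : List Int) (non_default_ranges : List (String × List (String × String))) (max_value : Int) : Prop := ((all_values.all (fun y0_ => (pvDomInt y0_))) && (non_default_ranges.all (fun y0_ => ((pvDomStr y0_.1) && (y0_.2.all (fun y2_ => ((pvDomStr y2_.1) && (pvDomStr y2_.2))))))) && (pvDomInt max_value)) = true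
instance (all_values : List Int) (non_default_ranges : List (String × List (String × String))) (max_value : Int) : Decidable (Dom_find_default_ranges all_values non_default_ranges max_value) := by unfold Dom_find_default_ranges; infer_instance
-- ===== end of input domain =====

-- B builds the COVERED set directly and emits each gap from a single run-length state machine
-- over 0..max_value, instead of A's complement set, repeated set differences, sort and
-- grouping pass (objective: alternative). A mutates nothing; equivalence is about the return value.

-- ===== PORT A =====
-- shared helper: int(s, 16) made total; Pre_ guarantees the parse succeeds wherever it is used
def parse16 (s : String) : Int := (PySem.Int.ofStrBase? s 16).getD 0

-- hand port of format(n, '02X') (uppercase hex, zero-padded to width 2); exact for 0 ≤ n,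
-- and both programs only apply it to integers in 0..max_value
def hexDigitU (k : Nat) : Char := if k < 10 then Char.ofNat (48 + k) else Char.ofNat (55 + k)

def toHexU (n : Nat) : List Char :=
  if h : n < 16 then [hexDigitU n]
  else toHexU (n / 16) ++ [hexDigitU (n % 16)]
decreasing_by exact Nat.div_lt_self (by omega) (by omega)

def fmt02X (n : Int) : String :=
  let ds := toHexU n.toNat
  String.mk (if ds.length < 2 then List.replicate (2 - ds.length) '0' ++ ds else ds)

def find_default_ranges (all_values : List Int) (non_default_ranges : List (String × List (String × String))) (max_value : Int) : List (String × String) :=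
  -- all_positions = set(range(max_value + 1)), then -= set(range(start, end + 1)) per pair
  let all_positions :=
    (PySem.Dict.values (PySem.Dict.mk non_default_ranges)).foldl
      (fun s ranges => ranges.foldl
        (fun s pr =>
          PySem.Set.diff s (PySem.Set.ofList (PySem.List.pyRange (parse16 pr.1) (parse16 pr.2 + 1) 1)))
        s)
      (PySem.Set.ofList (PySem.List.pyRange 0 (max_value + 1) 1))
  if all_positions = [] then []
  else
    match PySem.List.sorted all_positions (fun x => x) with
    | [] => []   -- unreachable: sorted of a nonempty list is nonempty
    | p0 :: rest =>
      let st := rest.foldl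
        (fun (st : List (String × String) × Int × Int) pos =>
          if pos > st.2.2 + 1 then (st.1 ++ [(fmt02X st.2.1, fmt02X st.2.2)], pos, pos)
          else (st.1, st.2.1, pos))
        ([], p0, p0)
      st.1 ++ [(fmt02X st.2.1, fmt02X st.2.2)]

-- ===== PORT B =====
def find_default_ranges_alt (all_values : List Int) (non_default_ranges : List (String × List (String × String))) (max_value : Int) : List (String × String) :=
  let covset :=
    (PySem.Dict.values (PySem.Dict.mk non_default_ranges)).foldl
      (fun s ranges => ranges.foldl
        (fun s pr => PySem.Set.update s (PySem.List.pyRange (parse16 pr.1) (parse16 pr.2 + 1) 1))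
        s)
      PySem.Set.empty
  let covered := fun (p : Int) => PySem.Set.contains covset p
  let st := (PySem.List.pyRange 0 (max_value + 1) 1).foldl
    (fun (st : List (String × String) × Option Int) p =>
      if covered p then
        match st.2 with
        | some s => (st.1 ++ [(fmt02X s, fmt02X (p - 1))], none)
        | none => st
      else
        match st.2 with
        | none => (st.1, some p)
        | some _ => st)
    ([], none)
  match st.2 with
  | some s => st.1 ++ [(fmt02X s, fmt02X max_value)]
  | none => st.1

-- ===== PRECONDITION & SPEC =====
-- Pre_ excludes exactly the inputs where int(start_hex, 16) / int(end_hex, 16) raises ValueError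
-- (a pair component that is not a base-16 integer literal): A raises there, and B raises too.
def Pre_find_default_ranges (all_values : List Int) (non_default_ranges : List (String × List (String × String))) (max_value : Int) : Prop :=
  ∀ ranges ∈ PySem.Dict.values (PySem.Dict.mk non_default_ranges), ∀ pr ∈ ranges,
    (PySem.Int.ofStrBase? pr.1 16).isSome ∧ (PySem.Int.ofStrBase? pr.2 16).isSome

instance (all_values : List Int) (non_default_ranges : List (String × List (String × String))) (max_value : Int) : Decidable (Pre_find_default_ranges all_values non_default_ranges max_value) := by unfold Pre_find_default_ranges; infer_instance

def pvWitness_find_default_ranges : List Int × (List (String × List (String × String))) × Int :=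
  ([], [("s1", [("2", "3"), ("0x7", "8")]), ("s2", [])], 10)

def Spec_find_default_ranges (all_values : List Int) (non_default_ranges : List (String × List (String × String))) (max_value : Int) (out : List (String × String)) : Prop := out = find_default_ranges_alt all_values non_default_ranges max_value
instance (all_values : List Int) (non_default_ranges : List (String × List (String × String))) (max_value : Int) (out : List (String × String)) : Decidable (Spec_find_default_ranges all_values non_default_ranges max_value out) := by unfold Spec_find_default_ranges; infer_instance

-- ===== CLAIM (what is proved, stated in full; the proofs are below) =====
def Claim_equal_find_default_ranges : Prop := ∀ (all_values : List Int) (non_default_ranges : List (String × List (String × String))) (max_value : Int), Dom_find_default_ranges all_values non_default_ranges max_value → Pre_find_default_ranges all_values non_default_ranges max_value → Spec_find_default_ranges all_values non_default_ranges max_value (find_default_ranges all_values non_default_ranges max_value)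

-- ===== LEMMAS AND PROOFS =====

-- run grouping: the common specification both scan loops compute
def runsExt (s p : Int) : List Int → List (Int × Int)
  | [] => [(s, p)]
  | y :: ys => if y > p + 1 then (s, p) :: runsExt y y ys else runsExt s y ys

def runs : List Int → List (Int × Int)
  | [] => []
  | x :: xs => runsExt x x xs

def fmtp (q : Int × Int) : String × String := (fmt02X q.1, fmt02X q.2)

-- membership in A's set after the inner subtraction loop
theorem mem_inner_foldl (P : List (String × String)) (S : PySem.Set Int) (p : Int) :
    (p ∈ P.foldl (fun s pr => PySem.Set.diff s (PySem.Set.ofList (PySem.List.pyRange (parse16 pr.1) (parse16 pr.2 + 1) 1))) S)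
    ↔ p ∈ S ∧ ∀ pr ∈ P, ¬(parse16 pr.1 ≤ p ∧ p ≤ parse16 pr.2) := by
  induction P generalizing S with
  | nil => simp
  | cons pr P ih =>
    simp only [List.foldl_cons, ih, PySem.Set.mem_diff, PySem.Set.mem_ofList,
      PySem.List.mem_pyRange_one, List.mem_cons]
    constructor
    · rintro ⟨⟨h1, h2⟩, h3⟩
      refine ⟨h1, ?_⟩
      rintro q (rfl | hq)
      · rintro ⟨ha, hb⟩; exact h2 ⟨ha, by omega⟩
      · exact h3 q hq
    · rintro ⟨h1, h2⟩
      refine ⟨⟨h1, ?_⟩, fun q hq => h2 q (Or.inr hq)⟩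
      rintro ⟨ha, hb⟩; exact h2 pr (Or.inl rfl) ⟨ha, by omega⟩

theorem nodup_inner_foldl (P : List (String × String)) (S : PySem.Set Int) (hS : S.Nodup) :
    (P.foldl (fun s pr => PySem.Set.diff s (PySem.Set.ofList (PySem.List.pyRange (parse16 pr.1) (parse16 pr.2 + 1) 1))) S).Nodup := by
  induction P generalizing S with
  | nil => exact hS
  | cons pr P ih => exact ih _ (PySem.Set.nodup_diff _ _ hS)

theorem mem_outer_foldl (V : List (List (String × String))) (S : PySem.Set Int) (p : Int) :
    (p ∈ V.foldl (fun s ranges => ranges.foldl (fun s pr => PySem.Set.diff s (PySem.Set.ofList (PySem.List.pyRange (parse16 pr.1) (parse16 pr.2 + 1) 1))) s) S)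
    ↔ p ∈ S ∧ ∀ r ∈ V, ∀ pr ∈ r, ¬(parse16 pr.1 ≤ p ∧ p ≤ parse16 pr.2) := by
  induction V generalizing S with
  | nil => simp
  | cons r V ih =>
    simp only [List.foldl_cons, ih, mem_inner_foldl, List.mem_cons]
    constructor
    · rintro ⟨⟨h1, h2⟩, h3⟩
      refine ⟨h1, ?_⟩
      rintro q (rfl | hq)
      · exact h2
      · exact h3 q hq
    · rintro ⟨h1, h2⟩
      exact ⟨⟨h1, h2 r (Or.inl rfl)⟩, fun q hq => h2 q (Or.inr hq)⟩

theorem nodup_outer_foldl (V : List (List (String × String))) (S : PySem.Set Int) (hS : S.Nodup) :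
    (V.foldl (fun s ranges => ranges.foldl (fun s pr => PySem.Set.diff s (PySem.Set.ofList (PySem.List.pyRange (parse16 pr.1) (parse16 pr.2 + 1) 1))) s) S).Nodup := by
  induction V generalizing S with
  | nil => exact hS
  | cons r V ih => exact ih _ (nodup_inner_foldl _ _ hS)

-- A's grouping pass over an explicit position list computes runs
def aLoop (xs : List Int) (st0 : List (String × String) × Int × Int) : List (String × String) × Int × Int :=
  xs.foldl
    (fun (st : List (String × String) × Int × Int) pos =>
      if pos > st.2.2 + 1 then (st.1 ++ [(fmt02X st.2.1, fmt02X st.2.2)], pos, pos)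
      else (st.1, st.2.1, pos))
    st0

theorem ascan (xs : List Int) : ∀ (acc : List (String × String)) (s p : Int),
    (aLoop xs (acc, s, p)).1 ++ [(fmt02X (aLoop xs (acc, s, p)).2.1, fmt02X (aLoop xs (acc, s, p)).2.2)]
      = acc ++ (runsExt s p xs).map fmtp := by
  induction xs with
  | nil => intro acc s p; simp [aLoop, runsExt, fmtp]
  | cons y ys ih =>
    intro acc s p
    by_cases h : y > p + 1
    · simp only [aLoop, List.foldl_cons, if_pos h] at ih ⊢
      rw [ih, runsExt]
      simp [fmtp, if_pos h]
    · simp only [aLoop, List.foldl_cons, if_neg h] at ih ⊢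
      rw [ih, runsExt]
      simp [if_neg h]

-- B's state machine over a range computes runs of the uncovered positions
theorem bscan (c : Int → Bool) (M : Int) : ∀ (n : Nat) (a : Int), (M - a).toNat = n →
    (∀ acc : List (String × String),
      (match ((PySem.List.pyRange a M 1).foldl
        (fun (st : List (String × String) × Option Int) p =>
          if c p then
            match st.2 with
            | some s => (st.1 ++ [(fmt02X s, fmt02X (p - 1))], none)
            | none => st
          else
            match st.2 with
            | none => (st.1, some p)
            | some _ => st)
        (acc, none)) with
       | (l, some s) => l ++ [(fmt02X s, fmt02X (M - 1))]
       | (l, none) => l)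
      = acc ++ (runs ((PySem.List.pyRange a M 1).filter (fun p => !c p))).map fmtp)
    ∧ (∀ (acc : List (String × String)) (s : Int), a ≤ M →
      (match ((PySem.List.pyRange a M 1).foldl
        (fun (st : List (String × String) × Option Int) p =>
          if c p then
            match st.2 with
            | some s => (st.1 ++ [(fmt02X s, fmt02X (p - 1))], none)
            | none => st
          else
            match st.2 with
            | none => (st.1, some p)
            | some _ => st)
        (acc, some s)) with
       | (l, some s) => l ++ [(fmt02X s, fmt02X (M - 1))]
       | (l, none) => l)
      = acc ++ (runsExt s (a - 1) ((PySem.List.pyRange a M 1).filter (fun p => !c p))).map fmtp) := by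
  intro n
  induction n with
  | zero =>
    intro a ha
    have hMa : M ≤ a := by omega
    rw [PySem.List.pyRange_one_eq_nil hMa]
    constructor
    · intro acc; simp [runs]
    · intro acc s haM
      have : a = M := le_antisymm haM hMa
      subst this
      simp [runsExt, fmtp]
  | succ n ih =>
    intro a ha
    have haM : a < M := by omega
    have ih' := ih (a + 1) (by omega)
    rw [PySem.List.pyRange_one_cons haM]
    constructor
    · intro acc
      by_cases hc : c a
      · simp only [List.foldl_cons, List.filter_cons]
        rw [if_pos (by simp [hc]), if_neg (by simp [hc])]
        exact ih'.1 acc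
      · simp only [List.foldl_cons, List.filter_cons]
        rw [if_neg (by simp [hc]), if_pos (by simp [hc])]
        have := ih'.2 acc a (by omega)
        rw [this]
        have hr : runsExt a (a + 1 - 1) ((PySem.List.pyRange (a + 1) M 1).filter (fun p => !c p))
            = runs (a :: (PySem.List.pyRange (a + 1) M 1).filter (fun p => !c p)) := by
          simp [runs, show a + 1 - 1 = a by ring]
        rw [hr]
    · intro acc s _
      by_cases hc : c a
      · simp only [List.foldl_cons, List.filter_cons]
        rw [if_pos (by simp [hc]), if_neg (by simp [hc])]
        have := ih'.1 (acc ++ [(fmt02X s, fmt02X (a - 1))])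
        rw [this]
        have hext : runsExt s (a - 1) ((PySem.List.pyRange (a + 1) M 1).filter (fun p => !c p))
            = (s, a - 1) :: runs ((PySem.List.pyRange (a + 1) M 1).filter (fun p => !c p)) := by
          cases hfl : (PySem.List.pyRange (a + 1) M 1).filter (fun p => !c p) with
          | nil => simp [runsExt, runs]
          | cons y ys =>
            have hy : y ∈ PySem.List.pyRange (a + 1) M 1 :=
              List.mem_of_mem_filter (hfl ▸ List.mem_cons_self)
            rw [PySem.List.mem_pyRange_one] at hy
            simp only [runsExt, runs]
            rw [if_pos (show y > (a - 1) + 1 by omega)]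
        rw [hext]
        simp [fmtp]
      · simp only [List.foldl_cons, List.filter_cons]
        rw [if_neg (by simp [hc]), if_pos (by simp [hc])]
        have := ih'.2 acc s (by omega)
        rw [this]
        have hstep : runsExt s (a - 1) (a :: (PySem.List.pyRange (a + 1) M 1).filter (fun p => !c p))
            = runsExt s a ((PySem.List.pyRange (a + 1) M 1).filter (fun p => !c p)) := by
          simp only [runsExt]
          rw [if_neg (show ¬(a > (a - 1) + 1) by omega)]
        rw [show a + 1 - 1 = a by ring, hstep]

-- ===== VERDICT (by name: the statement is the Claim_ definition above) =====
theorem mem_cov_inner (P : List (String × String)) (S : PySem.Set Int) (p : Int) :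
    (p ∈ P.foldl (fun s pr => PySem.Set.update s (PySem.List.pyRange (parse16 pr.1) (parse16 pr.2 + 1) 1)) S)
    ↔ p ∈ S ∨ ∃ pr ∈ P, parse16 pr.1 ≤ p ∧ p ≤ parse16 pr.2 := by
  induction P generalizing S with
  | nil => simp
  | cons pr P ih =>
    simp only [List.foldl_cons, ih, PySem.Set.mem_update, PySem.List.mem_pyRange_one, List.mem_cons]
    constructor
    · rintro (⟨h | ⟨h1, h2⟩⟩ | ⟨q, hq, hle⟩)
      · exact Or.inl h
      · exact Or.inr ⟨pr, Or.inl rfl, h1, by omega⟩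
      · exact Or.inr ⟨q, Or.inr hq, hle⟩
    · rintro (h | ⟨q, (rfl | hq), hle⟩)
      · exact Or.inl (Or.inl h)
      · exact Or.inl (Or.inr ⟨hle.1, by omega⟩)
      · exact Or.inr ⟨q, hq, hle⟩

theorem mem_cov_outer (V : List (List (String × String))) (S : PySem.Set Int) (p : Int) :
    (p ∈ V.foldl (fun s ranges => ranges.foldl (fun s pr => PySem.Set.update s (PySem.List.pyRange (parse16 pr.1) (parse16 pr.2 + 1) 1)) s) S)
    ↔ p ∈ S ∨ ∃ r ∈ V, ∃ pr ∈ r, parse16 pr.1 ≤ p ∧ p ≤ parse16 pr.2 := by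
  induction V generalizing S with
  | nil => simp
  | cons r V ih =>
    simp only [List.foldl_cons, ih, mem_cov_inner, List.mem_cons]
    constructor
    · rintro (⟨h | h⟩ | ⟨q, hq, hx⟩)
      · exact Or.inl h
      · exact Or.inr ⟨r, Or.inl rfl, h⟩
      · exact Or.inr ⟨q, Or.inr hq, hx⟩
    · rintro (h | ⟨q, (rfl | hq), hx⟩)
      · exact Or.inl (Or.inl h)
      · exact Or.inl (Or.inr hx)
      · exact Or.inr ⟨q, hq, hx⟩

theorem find_default_ranges_spec : Claim_equal_find_default_ranges := by
  intro all_values nds max_value _hdom _hpre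
  unfold Spec_find_default_ranges
  simp only [find_default_ranges, find_default_ranges_alt]
  set V := PySem.Dict.values (PySem.Dict.mk nds) with hV
  set M := max_value + 1 with hM
  set covset := V.foldl
      (fun s ranges => ranges.foldl
        (fun s pr => PySem.Set.update s (PySem.List.pyRange (parse16 pr.1) (parse16 pr.2 + 1) 1))
        s)
      PySem.Set.empty with hcs
  set cov : Int → Bool := fun p => PySem.Set.contains covset p with hcovdef
  have hcov : ∀ p, cov p = true ↔ ∃ r ∈ V, ∃ pr ∈ r, parse16 pr.1 ≤ p ∧ p ≤ parse16 pr.2 := by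
    intro p
    rw [hcovdef]
    simp only [PySem.Set.contains_iff, hcs, mem_cov_outer]
    simp [PySem.Set.empty]
  set allPos := V.foldl
      (fun s ranges => ranges.foldl
        (fun s pr =>
          PySem.Set.diff s (PySem.Set.ofList (PySem.List.pyRange (parse16 pr.1) (parse16 pr.2 + 1) 1)))
        s)
      (PySem.Set.ofList (PySem.List.pyRange 0 M 1)) with hAP
  set uncov := (PySem.List.pyRange 0 M 1).filter (fun p => !cov p) with hU
  -- the two position collections agree
  have hmem : ∀ p, p ∈ allPos ↔ p ∈ uncov := by
    intro p
    rw [hAP, mem_outer_foldl, hU, List.mem_filter]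
    rw [PySem.Set.mem_ofList]
    constructor
    · rintro ⟨h1, h2⟩
      refine ⟨h1, ?_⟩
      simp only [Bool.not_eq_true']
      rw [← Bool.not_eq_true, hcov p]
      rintro ⟨r, hr, pr, hpr, hle⟩
      exact h2 r hr pr hpr hle
    · rintro ⟨h1, h2⟩
      refine ⟨h1, fun r hr pr hpr hle => ?_⟩
      simp only [Bool.not_eq_true'] at h2
      rw [← Bool.not_eq_true, hcov p] at h2
      exact h2 ⟨r, hr, pr, hpr, hle⟩
  have hnodupA : allPos.Nodup := nodup_outer_foldl _ _ (PySem.Set.nodup_ofList _)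
  have hnodupU : uncov.Nodup := (PySem.List.nodup_pyRange_one 0 M).filter _
  have hperm : uncov.Perm allPos :=
    (List.perm_ext_iff_of_nodup hnodupU hnodupA).2 (fun p => ((hmem p).symm))
  have hsorted : PySem.List.sorted allPos (fun x => x) = uncov :=
    PySem.List.sorted_eq_of_perm_of_pairwise_lt _ _ _ hperm
      (List.Pairwise.filter _ (PySem.List.pairwise_lt_pyRange_one 0 M))
  -- B's result
  have hB := (bscan cov M (M - 0).toNat 0 rfl).1 []
  simp only [← hU] at hB
  rcases hfold : (PySem.List.pyRange 0 M 1).foldl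
      (fun (st : List (String × String) × Option Int) p =>
        if cov p then
          match st.2 with
          | some s => (st.1 ++ [(fmt02X s, fmt02X (p - 1))], none)
          | none => st
        else
          match st.2 with
          | none => (st.1, some p)
          | some _ => st)
      ([], none) with ⟨l, os⟩
  rw [hfold] at hB
  by_cases hA : allPos = []
  · -- no remaining positions: both sides are []
    have hUnil : uncov = [] := by
      have h := hperm; rw [hA] at h; exact h.eq_nil
    rw [if_pos hA]
    rw [hUnil] at hB
    simp only [runs, List.map_nil, List.nil_append] at hB
    cases os with
    | none => simpa using hB.symm
    | some s =>
      rw [show M - 1 = max_value by omega] at hB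
      simpa using hB.symm
  · rw [if_neg hA]
    have hUne : uncov ≠ [] := by
      intro h; apply hA
      have hp := hperm; rw [h] at hp; exact hp.symm.eq_nil
    obtain ⟨p0, rest, hu⟩ := List.exists_cons_of_ne_nil hUne
    simp only [hsorted, hu]
    have hAscan := ascan rest [] p0 p0
    simp only [aLoop, List.nil_append] at hAscan
    rw [hAscan]
    rw [hu] at hB
    simp only [runs] at hB
    rw [show M - 1 = max_value by omega] at hB
    cases os with
    | none => exact hB.symm
    | some s => exact hB.symm
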